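-- pv_equiv track=rewrite | github.com/doublemover/oneane | src/python/vaonis_instruments/gui_app.py | _is_dangerous_path
-- ===== SOURCE A (Python) =====
-- def _is_dangerous_path(path: str) -> bool:
--     lowered = path.lower()
--     dangerous = [
--         "shutdown",
--         "restart",
--         "update",
--         "delete",
--         "openarm",
--         "parkarm",
--     ]
--     return any(token in lowered for token in dangerous)
-- ===== SOURCE B (Python) =====
-- def _is_dangerous_path(path: str) -> bool:
--     tokens = ("shutdown", "restart", "update", "delete", "openarm", "parkarm")
--     s = path.lower()
--     for i in range(len(s)):
--         if any(s.startswith(t, i) for t in tokens):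
--             return True
--     return False
-- ===== Notes on version B (the rewrite author's own statement) =====
-- stated objective: alternative
-- what changed: Instead of six independent full-string substring membership searches, B makes one left-to-right pass over the lowered string, testing at each position whether any token starts there.
import Mathlib
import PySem

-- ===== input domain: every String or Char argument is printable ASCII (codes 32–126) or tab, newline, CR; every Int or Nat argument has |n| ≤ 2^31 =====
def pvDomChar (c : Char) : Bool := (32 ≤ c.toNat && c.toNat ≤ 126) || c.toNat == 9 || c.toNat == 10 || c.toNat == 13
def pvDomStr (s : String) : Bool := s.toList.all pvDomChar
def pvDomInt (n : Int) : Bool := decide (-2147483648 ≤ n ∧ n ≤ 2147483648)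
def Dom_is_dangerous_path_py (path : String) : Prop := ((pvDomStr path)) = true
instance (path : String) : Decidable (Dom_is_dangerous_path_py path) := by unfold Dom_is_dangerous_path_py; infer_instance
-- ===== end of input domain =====

-- B replaces A's six independent substring searches by one left-to-right scan of the
-- lowered string, checking at each position whether any token starts there (objective: alternative).

-- ===== PORT A =====
def pvDangerous : List (List Char) :=
  ["shutdown".toList, "restart".toList, "update".toList,
   "delete".toList, "openarm".toList, "parkarm".toList]

def is_dangerous_path_py (path : String) : Bool :=
  let lowered := PySem.Chars.lower path.toList
  pvDangerous.any (fun token => PySem.Chars.isIn token lowered)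

-- ===== PORT B =====
-- one pass: at each position (suffix) of the lowered string, does some token start here?
def pvScanB (cs : List Char) : Bool :=
  match cs with
  | [] => false
  | _ :: rest => pvDangerous.any (fun t => t.isPrefixOf cs) || pvScanB rest

def is_dangerous_path_py_alt (path : String) : Bool :=
  pvScanB (PySem.Chars.lower path.toList)

-- ===== PRECONDITION & SPEC =====
def Spec_is_dangerous_path_py (path : String) (out : Bool) : Prop := out = is_dangerous_path_py_alt path
instance (path : String) (out : Bool) : Decidable (Spec_is_dangerous_path_py path out) := by unfold Spec_is_dangerous_path_py; infer_instance

-- ===== CLAIM (what is proved, stated in full; the proofs are below) =====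
def Claim_equal_is_dangerous_path_py : Prop := ∀ (path : String), Dom_is_dangerous_path_py path → Spec_is_dangerous_path_py path (is_dangerous_path_py path)

-- ===== LEMMAS AND PROOFS =====

-- B's scan finds exactly the strings that contain some token as an infix
theorem pvScanB_iff (cs : List Char) :
    pvScanB cs = true ↔ ∃ t ∈ pvDangerous, t <:+: cs := by
  induction cs with
  | nil =>
    simp [pvScanB, List.infix_nil]
    decide
  | cons c rest ih =>
    simp only [pvScanB, Bool.or_eq_true, List.any_eq_true, List.isPrefixOf_iff_prefix, ih]
    constructor
    · rintro (⟨t, ht, hp⟩ | ⟨t, ht, hi⟩)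
      · exact ⟨t, ht, hp.isInfix⟩
      · exact ⟨t, ht, hi.trans (List.suffix_cons c rest).isInfix⟩
    · rintro ⟨t, ht, hi⟩
      rcases (List.infix_cons_iff).mp hi with hp | hi'
      · exact Or.inl ⟨t, ht, hp⟩
      · exact Or.inr ⟨t, ht, hi'⟩

-- ===== VERDICT (by name: the statement is the Claim_ definition above) =====
theorem is_dangerous_path_py_spec : Claim_equal_is_dangerous_path_py := by
  intro path _
  unfold Spec_is_dangerous_path_py is_dangerous_path_py is_dangerous_path_py_alt
  rw [Bool.eq_iff_iff]
  simp only [List.any_eq_true, PySem.Chars.isIn_iff_infix, pvScanB_iff]
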